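-- pv_equiv track=rewrite | github.com/pypi-data/pypi-mirror-263 | packages/pageserver/pageserver-0.0.1-py3-none-any.whl/pageserver/utils/base85.py | a85encode
-- ===== SOURCE A (Python) =====
-- def a85encode(arr: list[int]):
--     l = 4 - len(arr) % 4
--     arr = arr + [l]*l
--
--     res = ""
--
--     for i in range(0, len(arr), 4):
--         c = arr[i] << 24 | arr[i+1] << 16 | arr[i+2] << 8 | arr[i+3]
--         v = (c // 52200625) % 85 + 33
--         res += chr(v)
--         v = (c // 614125) % 85 + 33
--         res += chr(v)
--         v = (c // 7225) % 85 + 33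
--         res += chr(v)
--         v = (c // 85) % 85 + 33
--         res += chr(v)
--         v = c % 85 + 33
--         res += chr(v)
--
--     return res
-- ===== SOURCE B (Python) =====
-- ALPHABET = ''.join(chr(33 + i) for i in range(85))
-- PAIR = [ALPHABET[n // 85] + ALPHABET[n % 85] for n in range(7225)]
--
--
-- def a85encode(arr: list[int]):
--     pad = 4 - len(arr) % 4
--     data = arr + [pad] * pad
--     chunks = []
--     for i in range(0, len(data), 4):
--         c = (data[i] << 24 | data[i + 1] << 16 | data[i + 2] << 8 | data[i + 3]) % 4437053125
--         hi, rest = divmod(c, 52200625)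
--         mid, low = divmod(rest, 7225)
--         chunks.append(ALPHABET[hi] + PAIR[mid] + PAIR[low])
--     return ''.join(chunks)
-- ===== Notes on version B (the rewrite author's own statement) =====
-- stated objective: alternative
-- what changed: Replaces A's five independent divide-by-85^k-then-mod digit computations and chr() calls with a table-driven encoder: a precomputed 85-char alphabet and a 7225-entry two-digit pair table; each block value is reduced mod 85^5 and split by two divmods into one single digit and two pair-table lookups, chunks joined once at the end.
import Mathlib
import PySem

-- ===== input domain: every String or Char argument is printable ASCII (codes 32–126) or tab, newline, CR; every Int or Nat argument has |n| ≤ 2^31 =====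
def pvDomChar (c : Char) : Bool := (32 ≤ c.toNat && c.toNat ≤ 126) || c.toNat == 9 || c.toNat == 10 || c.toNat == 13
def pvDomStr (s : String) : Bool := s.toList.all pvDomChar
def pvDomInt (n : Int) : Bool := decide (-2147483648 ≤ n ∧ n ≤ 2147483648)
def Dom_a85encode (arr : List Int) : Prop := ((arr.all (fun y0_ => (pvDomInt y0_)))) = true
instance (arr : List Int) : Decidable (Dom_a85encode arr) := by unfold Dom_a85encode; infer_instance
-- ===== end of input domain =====

-- B replaces A's five independent divide-by-85^k digit computations with a precomputed
-- 85-char alphabet and a 7225-entry two-digit pair table: each block is reduced mod 85^5 and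
-- split by two divmods into one digit and two pairs looked up in the tables; objective: alternative.


-- ===== PORT A =====
def a85encode (arr : List Int) : String :=
  let l : Int := 4 - PySem.Int.mod (arr.length : Int) 4
  let arr2 := arr ++ List.replicate l.toNat l
  (PySem.List.pyRange 0 (arr2.length : Int) 4).foldl (fun res i =>
    let c := PySem.Int.bor (PySem.Int.bor (PySem.Int.bor
                ((PySem.List.pyGetD arr2 i 0) <<< (24 : Nat))
                ((PySem.List.pyGetD arr2 (i+1) 0) <<< (16 : Nat)))
                ((PySem.List.pyGetD arr2 (i+2) 0) <<< (8 : Nat)))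
                (PySem.List.pyGetD arr2 (i+3) 0)
    let res := res.push (Char.ofNat (PySem.Int.mod (PySem.Int.floordiv c 52200625) 85 + 33).toNat)
    let res := res.push (Char.ofNat (PySem.Int.mod (PySem.Int.floordiv c 614125) 85 + 33).toNat)
    let res := res.push (Char.ofNat (PySem.Int.mod (PySem.Int.floordiv c 7225) 85 + 33).toNat)
    let res := res.push (Char.ofNat (PySem.Int.mod (PySem.Int.floordiv c 85) 85 + 33).toNat)
    res.push (Char.ofNat (PySem.Int.mod c 85 + 33).toNat)) ""

-- ===== PORT B =====
-- ALPHABET = ''.join(chr(33 + i) for i in range(85))  (a string of ASCII chars, kept as its char list)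
def a85Alph : List Char := (PySem.List.pyRange 0 85 1).map (fun i => Char.ofNat (33 + i).toNat)

-- PAIR = [ALPHABET[n // 85] + ALPHABET[n % 85] for n in range(7225)]
def a85Pair : List (List Char) := (PySem.List.pyRange 0 7225 1).map (fun n =>
  [PySem.List.pyGetD a85Alph (PySem.Int.floordiv n 85) ' ',
   PySem.List.pyGetD a85Alph (PySem.Int.mod n 85) ' '])

def a85encode_alt (arr : List Int) : String :=
  let pad : Int := 4 - PySem.Int.mod (arr.length : Int) 4
  let data := arr ++ List.replicate pad.toNat pad
  let chunks := (PySem.List.pyRange 0 (data.length : Int) 4).foldl (fun (chunks : List (List Char)) i =>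
    let c := PySem.Int.mod (PySem.Int.bor (PySem.Int.bor (PySem.Int.bor
                ((PySem.List.pyGetD data i 0) <<< (24 : Nat))
                ((PySem.List.pyGetD data (i+1) 0) <<< (16 : Nat)))
                ((PySem.List.pyGetD data (i+2) 0) <<< (8 : Nat)))
                (PySem.List.pyGetD data (i+3) 0)) 4437053125
    let hi := PySem.Int.floordiv c 52200625
    let rest := PySem.Int.mod c 52200625
    let mid := PySem.Int.floordiv rest 7225
    let low := PySem.Int.mod rest 7225
    chunks ++ [[PySem.List.pyGetD a85Alph hi ' ']
               ++ PySem.List.pyGetD a85Pair mid []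
               ++ PySem.List.pyGetD a85Pair low []]) []
  String.ofList chunks.flatten

-- ===== PRECONDITION & SPEC =====
def Spec_a85encode (arr : List Int) (out : String) : Prop := out = a85encode_alt arr
instance (arr : List Int) (out : String) : Decidable (Spec_a85encode arr out) := by unfold Spec_a85encode; infer_instance

-- ===== CLAIM (what is proved, stated in full; the proofs are below) =====
def Claim_equal_a85encode : Prop := ∀ (arr : List Int), Dom_a85encode arr → Spec_a85encode arr (a85encode arr)

-- ===== LEMMAS AND PROOFS =====

-- table lookups: alphabet and pair table read back the digits
lemma alph_get (h : Int) (h0 : 0 ≤ h) (h1 : h < 85) :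
    PySem.List.pyGetD a85Alph h ' ' = Char.ofNat (33 + h).toNat := by
  unfold a85Alph
  exact PySem.List.pyGetD_map_pyRange_of_nonneg _ 85 h ' ' h0 h1

lemma pair_get (m : Int) (h0 : 0 ≤ m) (h1 : m < 7225) :
    PySem.List.pyGetD a85Pair m []
      = [Char.ofNat (33 + PySem.Int.floordiv m 85).toNat,
         Char.ofNat (33 + PySem.Int.mod m 85).toNat] := by
  unfold a85Pair
  rw [PySem.List.pyGetD_map_pyRange_of_nonneg _ 7225 m [] h0 h1]
  have hd : PySem.Int.floordiv m 85 = m / 85 := PySem.Int.floordiv_eq_ediv_of_pos (by norm_num)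
  have hm : PySem.Int.mod m 85 = m % 85 := PySem.Int.mod_eq_emod_of_pos (by norm_num)
  rw [hd, hm, alph_get _ (by omega) (by omega), alph_get _ (by omega) (by omega)]

-- the two per-block computations produce the same five characters
lemma block_chars (c : Int) :
    (let cm := PySem.Int.mod c 4437053125
     let hi := PySem.Int.floordiv cm 52200625
     let rest := PySem.Int.mod cm 52200625
     let mid := PySem.Int.floordiv rest 7225
     let low := PySem.Int.mod rest 7225
     [PySem.List.pyGetD a85Alph hi ' ']
       ++ PySem.List.pyGetD a85Pair mid []
       ++ PySem.List.pyGetD a85Pair low []) =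
    [Char.ofNat (PySem.Int.mod (PySem.Int.floordiv c 52200625) 85 + 33).toNat,
     Char.ofNat (PySem.Int.mod (PySem.Int.floordiv c 614125) 85 + 33).toNat,
     Char.ofNat (PySem.Int.mod (PySem.Int.floordiv c 7225) 85 + 33).toNat,
     Char.ofNat (PySem.Int.mod (PySem.Int.floordiv c 85) 85 + 33).toNat,
     Char.ofNat (PySem.Int.mod c 85 + 33).toNat] := by
  simp only [PySem.Int.mod_eq_emod_of_pos (by norm_num : (0:Int) < 4437053125),
    PySem.Int.mod_eq_emod_of_pos (by norm_num : (0:Int) < 52200625),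
    PySem.Int.mod_eq_emod_of_pos (by norm_num : (0:Int) < 7225),
    PySem.Int.mod_eq_emod_of_pos (by norm_num : (0:Int) < 85),
    PySem.Int.floordiv_eq_ediv_of_pos (by norm_num : (0:Int) < 52200625),
    PySem.Int.floordiv_eq_ediv_of_pos (by norm_num : (0:Int) < 614125),
    PySem.Int.floordiv_eq_ediv_of_pos (by norm_num : (0:Int) < 7225),
    PySem.Int.floordiv_eq_ediv_of_pos (by norm_num : (0:Int) < 85)]
  rw [alph_get _ (by omega) (by omega),
      pair_get _ (by omega) (by omega),
      pair_get _ (by omega) (by omega)]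
  simp only [PySem.Int.mod_eq_emod_of_pos (by norm_num : (0:Int) < 85),
    PySem.Int.floordiv_eq_ediv_of_pos (by norm_num : (0:Int) < 85),
    List.cons_append, List.nil_append, List.cons.injEq, and_true]
  refine ⟨?_, ?_, ?_, ?_, ?_⟩ <;> · congr 1; omega

-- fold correspondence: A's string pushes build the flatten of B's chunk list
lemma fold_mk (arr2 : List Int) (is : List Int) (chs : List (List Char)) :
    is.foldl (fun res i =>
      let c := PySem.Int.bor (PySem.Int.bor (PySem.Int.bor
                ((PySem.List.pyGetD arr2 i 0) <<< (24 : Nat))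
                ((PySem.List.pyGetD arr2 (i+1) 0) <<< (16 : Nat)))
                ((PySem.List.pyGetD arr2 (i+2) 0) <<< (8 : Nat)))
                (PySem.List.pyGetD arr2 (i+3) 0)
      let res := res.push (Char.ofNat (PySem.Int.mod (PySem.Int.floordiv c 52200625) 85 + 33).toNat)
      let res := res.push (Char.ofNat (PySem.Int.mod (PySem.Int.floordiv c 614125) 85 + 33).toNat)
      let res := res.push (Char.ofNat (PySem.Int.mod (PySem.Int.floordiv c 7225) 85 + 33).toNat)
      let res := res.push (Char.ofNat (PySem.Int.mod (PySem.Int.floordiv c 85) 85 + 33).toNat)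
      res.push (Char.ofNat (PySem.Int.mod c 85 + 33).toNat)) (String.ofList chs.flatten) =
    String.ofList (is.foldl (fun (chunks : List (List Char)) i =>
      let c := PySem.Int.mod (PySem.Int.bor (PySem.Int.bor (PySem.Int.bor
                ((PySem.List.pyGetD arr2 i 0) <<< (24 : Nat))
                ((PySem.List.pyGetD arr2 (i+1) 0) <<< (16 : Nat)))
                ((PySem.List.pyGetD arr2 (i+2) 0) <<< (8 : Nat)))
                (PySem.List.pyGetD arr2 (i+3) 0)) 4437053125
      let hi := PySem.Int.floordiv c 52200625
      let rest := PySem.Int.mod c 52200625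
      let mid := PySem.Int.floordiv rest 7225
      let low := PySem.Int.mod rest 7225
      chunks ++ [[PySem.List.pyGetD a85Alph hi ' ']
                 ++ PySem.List.pyGetD a85Pair mid []
                 ++ PySem.List.pyGetD a85Pair low []]) chs).flatten := by
  induction is generalizing chs with
  | nil => rfl
  | cons i is ih =>
    simp only [List.foldl_cons]
    rw [← ih]
    congr 1
    rw [block_chars]
    simp [String.push_eq_append, String.singleton_eq_ofList, ← String.ofList_append,
      List.flatten_append]

-- ===== VERDICT (by name: the statement is the Claim_ definition above) =====
theorem a85encode_spec : Claim_equal_a85encode := by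
  intro arr _
  show a85encode arr = a85encode_alt arr
  unfold a85encode a85encode_alt
  exact fold_mk _ _ []
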